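-- pv_equiv track=rewrite | github.com/Youssefx64/CadArena | backend/app/services/design_parser/diff_orchestrator.py | _default_adjacent_room_name
-- ===== SOURCE A (Python) =====
-- from typing import Any
--
-- def _default_adjacent_room_name(current_layout: dict[str, Any], room_type: str) -> str | None:
--     """Pick a stable adjacency hint for heuristic room additions."""
--
--     rooms = [
--         room
--         for room in current_layout.get("rooms", [])
--         if isinstance(room, dict) and str(room.get("name", "")).strip()
--     ]
--     preferred_types = ["corridor", "living", "kitchen", "bedroom"]
--     if room_type == "living":
--         preferred_types = ["corridor", "kitchen", "bedroom"]
--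
--     for preferred_type in preferred_types:
--         for room in rooms:
--             if str(room.get("room_type", "")).strip().lower() == preferred_type:
--                 return str(room.get("name", "")).strip()
--     return str(rooms[0].get("name", "")).strip() if rooms else None
-- ===== SOURCE B (Python) =====
-- def _default_adjacent_room_name(current_layout, room_type):
--     """Pick a stable adjacency hint for heuristic room additions."""
--     preferred = (["corridor", "kitchen", "bedroom"]
--                  if room_type == "living"
--                  else ["corridor", "living", "kitchen", "bedroom"])
--     best = None  # (rank, name): smallest priority rank seen so far, first occurrence wins
--     for room in current_layout.get("rooms", []):
--         if not isinstance(room, dict):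
--             continue
--         name = str(room.get("name", "")).strip()
--         if not name:
--             continue
--         rtype = str(room.get("room_type", "")).strip().lower()
--         rank = preferred.index(rtype) if rtype in preferred else len(preferred)
--         if best is None or rank < best[0]:
--             best = (rank, name)
--     return best[1] if best is not None else None
-- ===== Notes on version B (the rewrite author's own statement) =====
-- stated objective: alternative
-- what changed: Replaces A's nested priority scans (for each preferred type, rescan all rooms, then a separate fallback) with a single pass over the rooms that keeps an argmin accumulator over (priority rank, name) with first-occurrence tie-breaking; unmatched rooms get rank len(preferred) so the fallback is the same minimization.
import Mathlib
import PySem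

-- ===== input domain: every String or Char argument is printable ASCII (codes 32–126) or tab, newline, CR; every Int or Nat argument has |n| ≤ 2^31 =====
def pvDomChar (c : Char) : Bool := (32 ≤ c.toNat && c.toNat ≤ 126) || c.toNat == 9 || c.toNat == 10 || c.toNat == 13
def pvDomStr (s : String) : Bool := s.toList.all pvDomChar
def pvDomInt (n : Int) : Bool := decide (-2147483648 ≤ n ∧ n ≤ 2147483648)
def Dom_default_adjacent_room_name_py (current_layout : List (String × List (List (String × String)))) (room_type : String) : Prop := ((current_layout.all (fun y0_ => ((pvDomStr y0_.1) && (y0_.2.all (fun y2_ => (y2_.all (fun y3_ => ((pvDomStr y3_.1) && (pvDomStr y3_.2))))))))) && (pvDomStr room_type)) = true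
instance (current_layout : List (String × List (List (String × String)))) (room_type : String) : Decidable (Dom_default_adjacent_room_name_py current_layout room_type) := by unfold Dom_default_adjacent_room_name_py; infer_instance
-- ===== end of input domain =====

-- B replaces A's nested priority scans (for each preferred type, rescan the rooms) with ONE pass
-- over the rooms keeping an argmin-by-priority-rank accumulator (first occurrence wins); alternative, not faster.

-- ===== PORT A =====

-- room.get(k, dflt) on an association-list dict (first match)
def pvGetStr (room : List (String × String)) (k dflt : String) : String :=
  ((room.find? (fun kv => kv.1 == k)).map (·.2)).getD dflt

-- str(room.get("name","")).strip()
def pvRoomName (room : List (String × String)) : String :=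
  PySem.Str.strip (pvGetStr room "name" "")

-- str(room.get("room_type","")).strip().lower()
def pvRoomType (room : List (String × String)) : String :=
  PySem.Str.lower (PySem.Str.strip (pvGetStr room "room_type" ""))

-- current_layout.get("rooms", [])
def pvRawRooms (current_layout : List (String × List (List (String × String)))) : List (List (String × String)) :=
  ((current_layout.find? (fun kv => kv.1 == "rooms")).map (·.2)).getD []

-- the filtered rooms list (isinstance(room, dict) is always true under the type convention)
def pvRooms (current_layout : List (String × List (List (String × String)))) : List (List (String × String)) :=
  (pvRawRooms current_layout).filter (fun room => !(pvRoomName room == ""))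

-- inner loop of A: first room whose normalized room_type equals t, returning its cleaned name
def pvFindByType (rooms : List (List (String × String))) (t : String) : Option String :=
  (rooms.find? (fun room => pvRoomType room == t)).map pvRoomName

-- final fallback of A
def pvFallback (rooms : List (List (String × String))) : Option String :=
  match rooms with
  | [] => none
  | room :: _ => some (pvRoomName room)

-- outer loop of A over preferred_types
def pvLoopA (rooms : List (List (String × String))) : List String → Option String
  | [] => pvFallback rooms
  | t :: ts =>
    match pvFindByType rooms t with
    | some n => some n
    | none => pvLoopA rooms ts

def default_adjacent_room_name_py (current_layout : List (String × List (List (String × String)))) (room_type : String) : Option String :=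
  let rooms := pvRooms current_layout
  let preferred_types :=
    if room_type == "living" then ["corridor", "kitchen", "bedroom"]
    else ["corridor", "living", "kitchen", "bedroom"]
  pvLoopA rooms preferred_types

-- ===== PORT B =====

-- preferred.index(rtype) if rtype in preferred else len(preferred)
def pvRank (preferred : List String) (t : String) : Nat :=
  if preferred.contains t then preferred.idxOf t else preferred.length

-- loop body of B: skip non-rooms/empty names, keep the best (rank, name), first occurrence wins
def pvStepB (preferred : List String) (acc : Option (Nat × String)) (room : List (String × String)) : Option (Nat × String) :=
  let name := PySem.Str.strip (pvGetStr room "name" "")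
  if name == "" then acc
  else
    let rtype := PySem.Str.lower (PySem.Str.strip (pvGetStr room "room_type" ""))
    let rank := pvRank preferred rtype
    match acc with
    | none => some (rank, name)
    | some b => if rank < b.1 then some (rank, name) else acc

def default_adjacent_room_name_py_alt (current_layout : List (String × List (List (String × String)))) (room_type : String) : Option String :=
  let preferred :=
    if room_type == "living" then ["corridor", "kitchen", "bedroom"]
    else ["corridor", "living", "kitchen", "bedroom"]
  let best := (pvRawRooms current_layout).foldl (pvStepB preferred) none
  best.map (·.2)

-- ===== PRECONDITION & SPEC =====
def Spec_default_adjacent_room_name_py (current_layout : List (String × List (List (String × String)))) (room_type : String) (out : Option String) : Prop := out = default_adjacent_room_name_py_alt current_layout room_type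
instance (current_layout : List (String × List (List (String × String)))) (room_type : String) (out : Option String) : Decidable (Spec_default_adjacent_room_name_py current_layout room_type out) := by unfold Spec_default_adjacent_room_name_py; infer_instance

-- ===== CLAIM (what is proved, stated in full; the proofs are below) =====
def Claim_equal_default_adjacent_room_name_py : Prop := ∀ (current_layout : List (String × List (List (String × String)))) (room_type : String), Dom_default_adjacent_room_name_py current_layout room_type → Spec_default_adjacent_room_name_py current_layout room_type (default_adjacent_room_name_py current_layout room_type)

-- ===== LEMMAS AND PROOFS =====

-- B's step on the already-filtered rooms (the empty-name skip discharged)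
def pvStep' (preferred : List String) (acc : Option (Nat × String)) (room : List (String × String)) : Option (Nat × String) :=
  let rank := pvRank preferred (pvRoomType room)
  match acc with
  | none => some (rank, pvRoomName room)
  | some b => if rank < b.1 then some (rank, pvRoomName room) else acc

theorem foldB_eq_filter (P : List String) (rooms : List (List (String × String))) (acc : Option (Nat × String)) :
    rooms.foldl (pvStepB P) acc = (rooms.filter (fun room => !(pvRoomName room == ""))).foldl (pvStep' P) acc := by
  induction rooms generalizing acc with
  | nil => rfl
  | cons r rs ih =>
    simp only [List.foldl_cons, List.filter_cons]
    by_cases h : PySem.Str.strip (pvGetStr r "name" "") = ""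
    · have hstep : pvStepB P acc r = acc := by simp [pvStepB, h]
      have hfil : (!(pvRoomName r == "")) = false := by simp [pvRoomName, h]
      rw [hstep, hfil, ih]
      simp
    · have hb : (PySem.Str.strip (pvGetStr r "name" "") == "") = false := by simpa using h
      have hstep : pvStepB P acc r = pvStep' P acc r := by
        simp [pvStepB, pvStep', hb, pvRoomName, pvRoomType]
      have hfil : (!(pvRoomName r == "")) = true := by simp [pvRoomName, hb]
      rw [hstep, hfil, ih]
      simp

-- a rank-0 accumulator is never replaced (ranks are Nats)
theorem foldl_step'_absorb (P : List String) (rooms : List (List (String × String))) (n : String) :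
    rooms.foldl (pvStep' P) (some (0, n)) = some (0, n) := by
  induction rooms with
  | nil => rfl
  | cons r rs ih => simpa [pvStep'] using ih

-- rank against a cons'd preference list
theorem pvRank_cons (t : String) (ts : List String) (x : String) :
    pvRank (t :: ts) x = if x = t then 0 else pvRank ts x + 1 := by
  by_cases h : x = t
  · simp [pvRank, h]
  · have h' : (t == x) = false := by simpa using (Ne.symm h)
    simp only [pvRank, List.idxOf_cons, List.contains_cons, h']
    by_cases hm : ts.contains x
    · have hm' : x ∈ ts := by simpa using hm
      simp [h, hm']
    · have hm' : x ∉ ts := by simpa using hm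
      simp [h, hm']

-- peeling the top preference off the fold
theorem foldl_step'_cons (t : String) (ts : List String) (rooms : List (List (String × String))) (b : Nat × String) :
    rooms.foldl (pvStep' (t :: ts)) (some (b.1 + 1, b.2)) =
      match rooms.find? (fun room => pvRoomType room == t) with
      | some r => some (0, pvRoomName r)
      | none => (rooms.foldl (pvStep' ts) (some b)).map (fun c => (c.1 + 1, c.2)) := by
  induction rooms generalizing b with
  | nil => rfl
  | cons r rs ih =>
    simp only [List.foldl_cons, List.find?_cons]
    by_cases h : pvRoomType r = t
    · have hb : (pvRoomType r == t) = true := by simpa using h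
      rw [hb]
      show rs.foldl (pvStep' (t :: ts)) (pvStep' (t :: ts) (some (b.1 + 1, b.2)) r) = _
      have : pvStep' (t :: ts) (some (b.1 + 1, b.2)) r = some (0, pvRoomName r) := by
        simp [pvStep', pvRank_cons, h]
      rw [this, foldl_step'_absorb]
    · have hb : (pvRoomType r == t) = false := by simpa using h
      rw [hb]
      have hrank : pvRank (t :: ts) (pvRoomType r) = pvRank ts (pvRoomType r) + 1 := by
        simp [pvRank_cons, h]
      by_cases hlt : pvRank ts (pvRoomType r) < b.1
      · have h1 : pvStep' (t :: ts) (some (b.1 + 1, b.2)) r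
            = some (pvRank ts (pvRoomType r) + 1, pvRoomName r) := by
          simp [pvStep', hrank, Nat.succ_lt_succ hlt]
        have h2 : pvStep' ts (some b) r = some (pvRank ts (pvRoomType r), pvRoomName r) := by
          simp [pvStep', hlt]
        rw [h1, h2, ih (pvRank ts (pvRoomType r), pvRoomName r)]
      · have h1 : pvStep' (t :: ts) (some (b.1 + 1, b.2)) r = some (b.1 + 1, b.2) := by
          simp [pvStep', hrank]
          omega
        have h2 : pvStep' ts (some b) r = some b := by
          simp [pvStep', hlt]
        rw [h1, h2, ih b]

-- the empty preference list: the fold returns the first room (A's fallback)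
theorem foldl_step'_nil (rooms : List (List (String × String))) :
    (rooms.foldl (pvStep' []) none).map (·.2) = pvFallback rooms := by
  cases rooms with
  | nil => rfl
  | cons r rs =>
    show ((rs.foldl (pvStep' []) (pvStep' [] none r)).map (·.2)) = _
    have : pvStep' [] none r = some (0, pvRoomName r) := by
      simp [pvStep', pvRank]
    rw [this, foldl_step'_absorb]
    rfl

-- A's outer loop equals the single-pass argmin fold on the filtered rooms
theorem loopA_eq_fold (ts : List String) (rooms : List (List (String × String))) :
    pvLoopA rooms ts = (rooms.foldl (pvStep' ts) none).map (·.2) := by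
  induction ts with
  | nil => simpa using (foldl_step'_nil rooms).symm
  | cons t ts ih =>
    simp only [pvLoopA, pvFindByType]
    cases rooms with
    | nil => simp [ih]
    | cons r rs =>
      simp only [List.foldl_cons, List.find?_cons]
      by_cases h : pvRoomType r = t
      · have hb : (pvRoomType r == t) = true := by simpa using h
        rw [hb]
        have : pvStep' (t :: ts) none r = some (0, pvRoomName r) := by
          simp [pvStep', pvRank_cons, h]
        rw [this, foldl_step'_absorb]
        rfl
      · have hb : (pvRoomType r == t) = false := by simpa using h
        rw [hb]
        have h0 : pvStep' (t :: ts) none r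
            = some (pvRank ts (pvRoomType r) + 1, pvRoomName r) := by
          simp [pvStep', pvRank_cons, h]
        have h0' : pvStep' ts none r = some (pvRank ts (pvRoomType r), pvRoomName r) := by
          simp [pvStep']
        rw [h0, foldl_step'_cons t ts rs (pvRank ts (pvRoomType r), pvRoomName r)]
        cases hf : rs.find? (fun room => pvRoomType room == t) with
        | some r' => simp
        | none =>
          simp only [Option.map_map]
          rw [ih]
          simp [List.foldl_cons, h0']
          rfl

-- ===== VERDICT (by name: the statement is the Claim_ definition above) =====
theorem default_adjacent_room_name_py_spec : Claim_equal_default_adjacent_room_name_py := by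
  intro current_layout room_type _
  unfold Spec_default_adjacent_room_name_py default_adjacent_room_name_py default_adjacent_room_name_py_alt
  simp only [foldB_eq_filter, pvRooms]
  rw [loopA_eq_fold]
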